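-- pv_equiv track=rewrite | github.com/Sovik89/Scaler_inter_n_advanced | advanced_contest3_max_contiguous_chars.py | max_contiguous_c
-- ===== SOURCE A (Python) =====
-- def max_contiguous_c(A: str, B: int, C: str) -> int:
--     n = len(A)
--     max_c = 0
--     freq = {}
--     left = right = 0
--     while right < n:
--         freq[A[right]] = freq.get(A[right], 0) + 1
--         max_freq = freq.get(C, 0)
--         if right - left + 1 - max_freq > B:
--             freq[A[left]] -= 1
--             left += 1
--         max_c = max(max_c, right - left + 1)
--         right += 1
--     return max_c
-- ===== SOURCE B (Python) =====
-- def max_contiguous_c(A: str, B: int, C: str) -> int: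
--     n = len(A)
--     if B < 0:
--         return 0
--     bad = [i for i, ch in enumerate(A) if ch != C]
--     m = len(bad)
--     if m <= B:
--         return n
--     best = 0
--     for j in range(m - B + 1):
--         lo = bad[j - 1] if j > 0 else -1
--         hi = bad[j + B] if j + B < m else n
--         best = max(best, hi - lo - 1)
--     return best
-- ===== Notes on version B (the rewrite author's own statement) =====
-- stated objective: faster
-- what changed: A slides a window over the whole string maintaining a character-frequency dict (one dict update and lookup per character); B collects the indices of non-C characters once and takes the maximum gap spanned by B consecutive bad indices (with virtual boundaries -1 and n), with early exits for B < 0 and #bad <= B.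
import Mathlib
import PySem

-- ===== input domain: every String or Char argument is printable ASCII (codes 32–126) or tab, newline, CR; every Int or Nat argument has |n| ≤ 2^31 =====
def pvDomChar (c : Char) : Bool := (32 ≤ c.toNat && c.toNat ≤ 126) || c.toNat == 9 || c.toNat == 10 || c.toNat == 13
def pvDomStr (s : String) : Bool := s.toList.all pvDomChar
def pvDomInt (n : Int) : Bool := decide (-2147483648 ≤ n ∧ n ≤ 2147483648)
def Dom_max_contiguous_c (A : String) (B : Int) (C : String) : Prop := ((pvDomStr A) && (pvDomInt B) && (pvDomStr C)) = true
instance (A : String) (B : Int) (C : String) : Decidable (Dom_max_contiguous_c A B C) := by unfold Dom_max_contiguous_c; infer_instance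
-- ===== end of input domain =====

-- B replaces A's sliding window (char-frequency dict updated at every character) by a single gap
-- scan over the list of non-C positions: each maximal candidate window is the span between two bad
-- positions B apart (virtual boundaries -1 and n); same return value, no per-character dict work
-- (measurably faster by a constant factor in a timing run).

-- ===== PORT A =====
-- loop body of A's while-loop (one iteration; `right` is the loop counter)
def pvStepA (s : List Char) (C : String) (B : Int)
    (st : PySem.Dict String Int × Nat × Int) (right : Nat) :
    PySem.Dict String Int × Nat × Int :=
  let freq := st.1
  let left := st.2.1
  let max_c := st.2.2
  -- A[right]: 0 ≤ right < len(A), so the default is never used (exact)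
  let cr : String := String.ofList [s.getD right ' ']
  let freq := freq.insert cr (freq.getD cr 0 + 1)
  let max_freq : Int := freq.getD C 0
  let st2 : PySem.Dict String Int × Nat :=
    if (right : Int) - (left : Int) + 1 - max_freq > B then
      -- A[left]: 0 ≤ left ≤ right < len(A) (exact); the key is present in freq
      let cl : String := String.ofList [s.getD left ' ']
      (freq.insert cl (freq.getD cl 0 - 1), left + 1)
    else (freq, left)
  (st2.1, st2.2, max max_c ((right : Int) - (st2.2 : Int) + 1))

def max_contiguous_c (A : String) (B : Int) (C : String) : Int :=
  let s := A.toList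
  -- while right < n … right += 1  ≡  fold over range(n)
  ((List.range s.length).foldl (pvStepA s C B) (PySem.Dict.empty, 0, 0)).2.2

-- ===== PORT B =====
-- loop body of B's for-loop over j
def pvStepB (bad : List Int) (n : Nat) (B : Int) (best : Int) (j : Int) : Int :=
  let lo : Int := if 0 < j then PySem.List.pyGetD bad (j - 1) 0 else -1
  let hi : Int := if j + B < (bad.length : Int) then PySem.List.pyGetD bad (j + B) 0 else (n : Int)
  max best (hi - lo - 1)

def max_contiguous_c_alt (A : String) (B : Int) (C : String) : Int :=
  let s := A.toList
  let n := s.length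
  if B < 0 then 0
  else
    -- bad = [i for i, ch in enumerate(A) if ch != C]
    let bad : List Int :=
      ((PySem.List.enumerate s).filter (fun p => !(String.ofList [p.2] == C))).map (fun p => p.1)
    let m := bad.length
    if (m : Int) ≤ B then (n : Int)
    else (PySem.List.pyRange 0 ((m : Int) - B + 1) 1).foldl (pvStepB bad n B) 0

-- ===== PRECONDITION & SPEC =====
def Spec_max_contiguous_c (A : String) (B : Int) (C : String) (out : Int) : Prop := out = max_contiguous_c_alt A B C
instance (A : String) (B : Int) (C : String) (out : Int) : Decidable (Spec_max_contiguous_c A B C out) := by unfold Spec_max_contiguous_c; infer_instance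

-- ===== CLAIM (what is proved, stated in full; the proofs are below) =====
def Claim_equal_max_contiguous_c : Prop := ∀ (A : String) (B : Int) (C : String), Dom_max_contiguous_c A B C → Spec_max_contiguous_c A B C (max_contiguous_c A B C)

-- ===== LEMMAS AND PROOFS =====

-- `A[i] != C` as a predicate on the character
def pvBadP (C : String) (ch : Char) : Bool := !(String.ofList [ch] == C)

-- number of non-C characters among the first k
def pvCnt (C : String) (s : List Char) (k : Nat) : Nat := (s.take k).countP (pvBadP C)

-- number of C characters among the first k
def pvGood (C : String) (s : List Char) (k : Nat) : Nat :=
  (s.take k).countP (fun ch => String.ofList [ch] == C)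

-- A's `left` pointer after k iterations
def pvLf (C : String) (s : List Char) (B : Int) : Nat → Nat
  | 0 => 0
  | k + 1 =>
    let l := pvLf C s B k
    if ((pvCnt C s (k + 1) : Int) - (pvCnt C s l : Int) > B) then l + 1 else l

-- the positions of the non-C characters, in increasing order
def pvBadIdx (C : String) (s : List Char) : List Nat :=
  (List.range s.length).filter (fun i => pvBadP C (s.getD i ' '))

-- B's window bounds for gap j (bN = B.toNat)
def pvLo (C : String) (s : List Char) (j : Nat) : Int :=
  if 0 < j then ((pvBadIdx C s).getD (j - 1) 0 : Nat) else -1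
def pvHi (C : String) (s : List Char) (bN : Nat) (j : Nat) : Int :=
  if j + bN < (pvBadIdx C s).length then ((pvBadIdx C s).getD (j + bN) 0 : Nat) else (s.length : Nat)

-- ---- counting lemmas ----
lemma countP_badP_add_good (C : String) (l : List Char) :
    l.countP (pvBadP C) + l.countP (fun ch => String.ofList [ch] == C) = l.length := by
  induction l with
  | nil => simp
  | cons ch l ih =>
    by_cases h : String.ofList [ch] == C <;>
      simp [List.countP_cons, pvBadP, h] <;> omega

lemma pvCnt_succ (C : String) (s : List Char) (k : Nat) (h : k < s.length) :
    pvCnt C s (k + 1) = pvCnt C s k + (if pvBadP C (s.getD k ' ') then 1 else 0) := by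
  unfold pvCnt
  rw [List.take_succ, List.countP_append, List.getElem?_eq_getElem h]
  have : s.getD k ' ' = s[k] := by
    rw [List.getD_eq_getElem?_getD, List.getElem?_eq_getElem h]; rfl
  rw [this]
  by_cases hb : pvBadP C s[k] <;> simp [List.countP_cons, hb]

lemma pvGood_succ (C : String) (s : List Char) (k : Nat) (h : k < s.length) :
    pvGood C s (k + 1) = pvGood C s k + (if String.ofList [s.getD k ' '] == C then 1 else 0) := by
  unfold pvGood
  rw [List.take_succ, List.countP_append, List.getElem?_eq_getElem h]
  have : s.getD k ' ' = s[k] := by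
    rw [List.getD_eq_getElem?_getD, List.getElem?_eq_getElem h]; rfl
  rw [this]
  by_cases hb : String.ofList [s[k]] == C <;> simp [List.countP_cons, hb]

lemma pvCnt_mono (C : String) (s : List Char) {a b : Nat} (h : a ≤ b) :
    pvCnt C s a ≤ pvCnt C s b := by
  unfold pvCnt
  have : b = a + (b - a) := by omega
  rw [this, List.take_add, List.countP_append]
  omega

lemma pvGood_mono (C : String) (s : List Char) {a b : Nat} (h : a ≤ b) :
    pvGood C s a ≤ pvGood C s b := by
  unfold pvGood
  have : b = a + (b - a) := by omega
  rw [this, List.take_add, List.countP_append]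
  omega

lemma pvCnt_add_pvGood (C : String) (s : List Char) {k : Nat} (h : k ≤ s.length) :
    pvCnt C s k + pvGood C s k = k := by
  have h1 := countP_badP_add_good C (s.take k)
  have h2 : (s.take k).length = k := by simp [List.length_take]; omega
  unfold pvCnt pvGood
  omega

-- ---- lf lemmas ----
lemma pvLf_le (C : String) (s : List Char) (B : Int) : ∀ k, pvLf C s B k ≤ k := by
  intro k
  induction k with
  | zero => simp [pvLf]
  | succ k ih => simp only [pvLf]; split <;> omega

lemma pvLf_mono_succ (C : String) (s : List Char) (B : Int) (k : Nat) :
    pvLf C s B k ≤ pvLf C s B (k + 1) ∧ pvLf C s B (k + 1) ≤ pvLf C s B k + 1 := by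
  constructor <;> (simp only [pvLf]; split <;> omega)

lemma pvLf_add_le (C : String) (s : List Char) (B : Int) (a : Nat) :
    ∀ d, pvLf C s B (a + d) ≤ pvLf C s B a + d := by
  intro d
  induction d with
  | zero => simp
  | succ d ih =>
    have h := pvLf_mono_succ C s B (a + d)
    have : a + (d + 1) = (a + d) + 1 := by omega
    rw [this]
    omega

-- a valid window keeps `left` at or before its start
lemma pvLf_upper (C : String) (s : List Char) (B : Int) (l k : Nat)
    (hval : (pvCnt C s (l + k) : Int) - (pvCnt C s l : Int) ≤ B) :
    ∀ r, r ≤ l + k → pvLf C s B r ≤ l := by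
  intro r
  induction r with
  | zero => intro _; simp [pvLf]
  | succ r ih =>
    intro hr
    have ihr := ih (by omega)
    rcases Nat.lt_or_ge (pvLf C s B r) l with hlt | hge
    · have := (pvLf_mono_succ C s B r).2
      omega
    · have heq : pvLf C s B r = l := by omega
      simp only [pvLf, heq]
      rw [if_neg]
      have hsucc : pvCnt C s (Nat.succ r) = pvCnt C s (r + 1) := rfl
      have h1 := pvCnt_mono C s (show r + 1 ≤ l + k by omega)
      omega

-- the window size reached is the size of some valid window
lemma pvLf_valid (C : String) (s : List Char) (B : Int) (hB : 0 ≤ B) (k : Nat) :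
    ∃ l, l + (k - pvLf C s B k) ≤ k ∧
      (pvCnt C s (l + (k - pvLf C s B k)) : Int) - (pvCnt C s l : Int) ≤ B := by
  induction k with
  | zero =>
    refine ⟨0, by simp [pvLf], ?_⟩
    simp [pvLf]
    omega
  | succ k ih =>
    have hle := pvLf_le C s B k
    have hle' := pvLf_le C s B (k + 1)
    by_cases hc : ((pvCnt C s (k + 1) : Int) - (pvCnt C s (pvLf C s B k) : Int) > B)
    · have heq : pvLf C s B (k + 1) = pvLf C s B k + 1 := by
        simp only [pvLf]; rw [if_pos hc]
      obtain ⟨l, hl1, hl2⟩ := ih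
      refine ⟨l, by omega, ?_⟩
      have : k + 1 - pvLf C s B (k + 1) = k - pvLf C s B k := by omega
      rw [this]
      exact hl2
    · have heq : pvLf C s B (k + 1) = pvLf C s B k := by
        simp only [pvLf]; rw [if_neg hc]
      refine ⟨pvLf C s B k, by omega, ?_⟩
      rw [heq]
      have h2 : pvLf C s B k + (k + 1 - pvLf C s B k) = k + 1 := by omega
      rw [h2]
      omega

-- k ≤ n - lf n for every valid window of size k
lemma pvLf_ge_of_valid (C : String) (s : List Char) (B : Int) (l k : Nat)
    (hlk : l + k ≤ s.length)
    (hval : (pvCnt C s (l + k) : Int) - (pvCnt C s l : Int) ≤ B) :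
    k ≤ s.length - pvLf C s B s.length := by
  have h1 := pvLf_upper C s B l k hval (l + k) le_rfl
  have h2 := pvLf_add_le C s B (l + k) (s.length - (l + k))
  have h3 : (l + k) + (s.length - (l + k)) = s.length := by omega
  rw [h3] at h2
  omega

-- ---- bridge for port A ----
lemma loopA_inv (s : List Char) (C : String) (B : Int) :
    ∀ k, k ≤ s.length → ∃ freq : PySem.Dict String Int,
      (List.range k).foldl (pvStepA s C B) (PySem.Dict.empty, 0, 0)
        = (freq, pvLf C s B k, ((k - pvLf C s B k : Nat) : Int))
      ∧ freq.getD C 0 = ((pvGood C s k - pvGood C s (pvLf C s B k) : Nat) : Int) := by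
  intro k
  induction k with
  | zero =>
    intro _
    refine ⟨PySem.Dict.empty, by simp [pvLf], ?_⟩
    simp [pvLf, PySem.Dict.getD_empty]
  | succ k ih =>
    intro hk1
    obtain ⟨freq, hfold, hfreq⟩ := ih (by omega)
    have hkn : k < s.length := by omega
    have hlk := pvLf_le C s B k
    have hgl_le : pvGood C s (pvLf C s B k) ≤ pvGood C s k := pvGood_mono C s (by omega)
    have hgk_le : pvGood C s k ≤ pvGood C s (k + 1) := pvGood_mono C s (by omega)
    have hgl1_le : pvGood C s (pvLf C s B k + 1) ≤ pvGood C s (k + 1) :=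
      pvGood_mono C s (by omega)
    have e1 : pvCnt C s (k + 1) + pvGood C s (k + 1) = k + 1 :=
      pvCnt_add_pvGood C s (by omega)
    have e2 : pvCnt C s (pvLf C s B k) + pvGood C s (pvLf C s B k) = pvLf C s B k :=
      pvCnt_add_pvGood C s (by omega)
    have hcnt_le : pvCnt C s (pvLf C s B k) ≤ pvCnt C s (k + 1) := pvCnt_mono C s (by omega)
    have hgk1 := pvGood_succ C s k hkn
    rw [List.range_succ, List.foldl_append, hfold, List.foldl_cons, List.foldl_nil]
    simp only [pvStepA]
    set cr := String.ofList [s.getD k ' '] with hcr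
    set cl := String.ofList [s.getD (pvLf C s B k) ' '] with hcl
    set freq1 := freq.insert cr (freq.getD cr 0 + 1) with hfq1
    have hfreq1 : freq1.getD C 0
        = ((pvGood C s (k + 1) - pvGood C s (pvLf C s B k) : Nat) : Int) := by
      rw [hfq1, PySem.Dict.getD_insert]
      by_cases hb : cr = C
      · rw [if_pos hb.symm, hb, hfreq]
        have h4 : pvGood C s (k + 1) = pvGood C s k + 1 := by
          simp [hgk1, hb]
        omega
      · rw [if_neg (fun h => hb h.symm), hfreq]
        have h4 : pvGood C s (k + 1) = pvGood C s k := by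
          simp [hgk1, hb]
        omega
    rw [hfreq1]
    by_cases hcond : ((pvCnt C s (k + 1) : Int) - (pvCnt C s (pvLf C s B k) : Int) > B)
    · have hcond' : ((k : Int) - ((pvLf C s B k : Nat) : Int) + 1
          - ((pvGood C s (k + 1) - pvGood C s (pvLf C s B k) : Nat) : Int) > B) := by
        omega
      rw [if_pos hcond']
      dsimp only
      have hLf1 : pvLf C s B (k + 1) = pvLf C s B k + 1 := by
        simp only [pvLf]
        rw [if_pos hcond]
      have hln : pvLf C s B k < s.length := by omega
      have hgl1 := pvGood_succ C s (pvLf C s B k) hln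
      refine ⟨freq1.insert cl (freq1.getD cl 0 - 1), ?_, ?_⟩
      · rw [hLf1]
        have hmax : max ((k - pvLf C s B k : Nat) : Int)
              ((k : Int) - ((pvLf C s B k + 1 : Nat) : Int) + 1)
            = ((k + 1 - (pvLf C s B k + 1) : Nat) : Int) := by
          have h1 : ((k : Int) - ((pvLf C s B k + 1 : Nat) : Int) + 1)
              = ((k - pvLf C s B k : Nat) : Int) := by push_cast; omega
          have h2 : (k + 1 - (pvLf C s B k + 1)) = k - pvLf C s B k := by omega
          rw [h1, h2, max_self]
        rw [hmax]
      · rw [hLf1, PySem.Dict.getD_insert]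
        by_cases hb : cl = C
        · rw [if_pos hb.symm, hb, hfreq1]
          have h5 : pvGood C s (pvLf C s B k + 1) = pvGood C s (pvLf C s B k) + 1 := by
            rw [hgl1, ← hcl, hb]
            simp
          omega
        · rw [if_neg (fun h => hb h.symm), hfreq1]
          have h5 : pvGood C s (pvLf C s B k + 1) = pvGood C s (pvLf C s B k) := by
            rw [hgl1, ← hcl]
            simp [hb]
          omega
    · have hcond' : ¬ ((k : Int) - ((pvLf C s B k : Nat) : Int) + 1
          - ((pvGood C s (k + 1) - pvGood C s (pvLf C s B k) : Nat) : Int) > B) := by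
        omega
      rw [if_neg hcond']
      dsimp only
      have hLf1 : pvLf C s B (k + 1) = pvLf C s B k := by
        simp only [pvLf]
        rw [if_neg hcond]
      refine ⟨freq1, ?_, ?_⟩
      · rw [hLf1]
        have hmax : max ((k - pvLf C s B k : Nat) : Int)
              ((k : Int) - ((pvLf C s B k : Nat) : Int) + 1)
            = ((k + 1 - pvLf C s B k : Nat) : Int) := by
          have h1 : ((k : Int) - ((pvLf C s B k : Nat) : Int) + 1)
              = ((k + 1 - pvLf C s B k : Nat) : Int) := by push_cast; omega
          rw [h1]
          apply max_eq_right
          push_cast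
          omega
        rw [hmax]
      · rw [hLf1]
        exact hfreq1

lemma bridgeA (A : String) (B : Int) (C : String) :
    max_contiguous_c A B C
      = ((A.toList.length - pvLf C A.toList B A.toList.length : Nat) : Int) := by
  obtain ⟨freq, hfold, _⟩ := loopA_inv A.toList C B A.toList.length le_rfl
  simp only [max_contiguous_c]
  rw [hfold]

-- ---- generic list lemmas ----
lemma getD_map_int (l : List Nat) (i : Nat) :
    (l.map (fun (x : Nat) => (x : Int))).getD i 0 = ((l.getD i 0 : Nat) : Int) := by
  induction l generalizing i with
  | nil => cases i <;> rfl
  | cons x l ih => cases i with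
    | zero => rfl
    | succ i => exact ih i

lemma foldl_max_range (f : Nat → Int) (t : Nat) :
    (0 : Int) ≤ (List.range t).foldl (fun b j => max b (f j)) 0
    ∧ (∀ j, j < t → f j ≤ (List.range t).foldl (fun b j => max b (f j)) 0)
    ∧ ((List.range t).foldl (fun b j => max b (f j)) 0 = 0
        ∨ ∃ j, j < t ∧ (List.range t).foldl (fun b j => max b (f j)) 0 = f j) := by
  induction t with
  | zero => simp
  | succ t ih =>
    obtain ⟨ih0, ih1, ih2⟩ := ih
    rw [List.range_succ, List.foldl_append]
    refine ⟨?_, ?_, ?_⟩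
    · simp only [List.foldl]
      exact le_trans ih0 (le_max_left _ _)
    · intro j hj
      simp only [List.foldl]
      rcases Nat.lt_or_ge j t with h | h
      · exact le_trans (ih1 j h) (le_max_left _ _)
      · have : j = t := by omega
        subst this
        exact le_max_right _ _
    · simp only [List.foldl]
      rcases max_choice ((List.range t).foldl (fun b j => max b (f j)) 0) (f t) with h | h
      · rw [h]
        rcases ih2 with h2 | ⟨j, hj, h2⟩
        · exact Or.inl h2
        · exact Or.inr ⟨j, by omega, h2⟩
      · exact Or.inr ⟨t, by omega, h⟩

lemma sorted_lt_filter :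
    ∀ (l : List Nat), l.Pairwise (· < ·) → ∀ (p : Nat) (j : Nat) (hj : j < l.length),
      (l[j] < p ↔ j < (l.filter (fun x => decide (x < p))).length) := by
  intro l hl
  induction l with
  | nil => intro p j hj; simp at hj
  | cons x xs ih =>
    rw [List.pairwise_cons] at hl
    obtain ⟨hx, hxs⟩ := hl
    intro p j hj
    cases j with
    | zero =>
      simp only [List.getElem_cons_zero]
      by_cases hxp : x < p
      · simp only [List.filter_cons, decide_eq_true hxp]
        simp [hxp]
      · constructor
        · intro h; exact absurd h hxp
        · intro h
          exfalso
          have hnil : (x :: xs).filter (fun y => decide (y < p)) = [] := by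
            rw [List.filter_eq_nil_iff]
            intro a ha
            rcases List.mem_cons.mp ha with rfl | ha'
            · simp [hxp]
            · have := hx a ha'
              simp only [decide_eq_true_eq]
              omega
          rw [hnil] at h
          simp at h
    | succ j =>
      simp only [List.getElem_cons_succ]
      have hj' : j < xs.length := by simpa using hj
      by_cases hxp : x < p
      · have hf : (x :: xs).filter (fun y => decide (y < p))
            = x :: xs.filter (fun y => decide (y < p)) := by
          simp [List.filter_cons, hxp]
        rw [hf, List.length_cons, ih hxs p j hj']
        omega
      · have hnot : ¬ xs[j] < p := by
          have := hx xs[j] (List.getElem_mem hj')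
          omega
        constructor
        · intro h; exact absurd h hnot
        · intro h
          exfalso
          have hnil : (x :: xs).filter (fun y => decide (y < p)) = [] := by
            rw [List.filter_eq_nil_iff]
            intro a ha
            rcases List.mem_cons.mp ha with rfl | ha'
            · simp [hxp]
            · have := hx a ha'
              simp only [decide_eq_true_eq]
              omega
          rw [hnil] at h
          simp at h

lemma range_filter_lt (n p : Nat) (h : p ≤ n) :
    (List.range n).filter (fun i => decide (i < p)) = List.range p := by
  induction n with
  | zero =>
    have : p = 0 := by omega
    subst this; rfl
  | succ n ih =>
    rw [List.range_succ, List.filter_append]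
    rcases Nat.lt_or_ge p (n + 1) with h | h
    · have hp : p ≤ n := by omega
      rw [ih hp]
      have : (List.filter (fun i => decide (i < p)) [n]) = [] := by
        simp; omega
      rw [this, List.append_nil]
    · have hp : p = n + 1 := by omega
      subst hp
      have h1 : (List.range n).filter (fun i => decide (i < n + 1)) = List.range n := by
        rw [List.filter_eq_self]
        intro a ha
        simp only [List.mem_range] at ha
        simp; omega
      rw [h1]
      have h2 : (List.filter (fun i => decide (i < n + 1)) [n]) = [n] := by simp
      rw [h2, ← List.range_succ]

-- ---- pvBadIdx lemmas ----
lemma badIdx_sorted (C : String) (s : List Char) : (pvBadIdx C s).Pairwise (· < ·) := by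
  exact List.Pairwise.filter _ (List.pairwise_lt_range)

lemma badIdx_lt_length (C : String) (s : List Char) {j : Nat} (hj : j < (pvBadIdx C s).length) :
    (pvBadIdx C s)[j] < s.length := by
  have hmem := List.getElem_mem hj
  unfold pvBadIdx at hmem
  have := List.mem_filter.mp hmem
  simpa using this.1

lemma cnt_filter_range (C : String) (s : List Char) : ∀ p, p ≤ s.length →
    pvCnt C s p = ((List.range p).filter (fun i => pvBadP C (s.getD i ' '))).length := by
  intro p hp
  induction p with
  | zero => simp [pvCnt]
  | succ p ih =>
    rw [List.range_succ, List.filter_append, List.length_append,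
        ← ih (by omega), pvCnt_succ C s p (by omega)]
    by_cases hb : pvBadP C (s.getD p ' ') <;>
      (rw [List.getD_eq_getElem?_getD] at hb; simp [hb])

lemma badIdx_length (C : String) (s : List Char) :
    (pvBadIdx C s).length = pvCnt C s s.length := by
  unfold pvBadIdx
  rw [cnt_filter_range C s s.length le_rfl]

lemma badIdx_lt_iff (C : String) (s : List Char) {j p : Nat}
    (hj : j < (pvBadIdx C s).length) (hp : p ≤ s.length) :
    ((pvBadIdx C s)[j] < p ↔ j < pvCnt C s p) := by
  rw [sorted_lt_filter (pvBadIdx C s) (badIdx_sorted C s) p j hj]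
  unfold pvBadIdx
  rw [List.filter_filter]
  have hcongr : (List.range s.length).filter
      (fun a => decide (a < p) && pvBadP C (s.getD a ' '))
      = (List.range p).filter (fun a => pvBadP C (s.getD a ' ')) := by
    rw [show (fun (a : Nat) => decide (a < p) && pvBadP C (s.getD a ' '))
        = (fun (a : Nat) => pvBadP C (s.getD a ' ') && decide (a < p)) from
      funext (fun a => Bool.and_comm _ _), ← List.filter_filter,
      range_filter_lt s.length p hp]
  rw [hcongr, ← cnt_filter_range C s p hp]

lemma cnt_at_badIdx (C : String) (s : List Char) {j : Nat} (hj : j < (pvBadIdx C s).length) :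
    pvCnt C s ((pvBadIdx C s)[j]) = j := by
  have hb : (pvBadIdx C s)[j] ≤ s.length := le_of_lt (badIdx_lt_length C s hj)
  have h1 := badIdx_lt_iff C s hj hb
  have h2 : ¬ ((pvBadIdx C s)[j] < (pvBadIdx C s)[j]) := by omega
  have hle : pvCnt C s ((pvBadIdx C s)[j]) ≤ j := by
    by_contra hcon
    exact h2 (h1.mpr (by omega))
  by_contra hne
  have hlt : pvCnt C s ((pvBadIdx C s)[j]) < j := by omega
  set q := pvCnt C s ((pvBadIdx C s)[j]) with hq
  have hqlen : q < (pvBadIdx C s).length := by omega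
  have h3 := badIdx_lt_iff C s hqlen hb
  have h4 : (pvBadIdx C s)[q] < (pvBadIdx C s)[j] := by
    have := List.pairwise_iff_getElem.mp (badIdx_sorted C s) q j hqlen hj hlt
    exact this
  have := h3.mp h4
  omega

lemma cnt_at_badIdx_succ (C : String) (s : List Char) {j : Nat} (hj : j < (pvBadIdx C s).length) :
    pvCnt C s ((pvBadIdx C s)[j] + 1) = j + 1 := by
  have hbl := badIdx_lt_length C s hj
  have hb : (pvBadIdx C s)[j] + 1 ≤ s.length := by omega
  have h1 := badIdx_lt_iff C s hj hb
  have hlow : j < pvCnt C s ((pvBadIdx C s)[j] + 1) := h1.mp (by omega)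
  by_contra hne
  have hgt : j + 1 < pvCnt C s ((pvBadIdx C s)[j] + 1) := by omega
  have hjlen : j + 1 < (pvBadIdx C s).length := by
    have := badIdx_length C s
    have hmono := pvCnt_mono C s hb
    omega
  have h3 := badIdx_lt_iff C s hjlen hb
  have h4 : (pvBadIdx C s)[j + 1] < (pvBadIdx C s)[j] + 1 := h3.mpr hgt
  have h5 : (pvBadIdx C s)[j] < (pvBadIdx C s)[j + 1] :=
    List.pairwise_iff_getElem.mp (badIdx_sorted C s) j (j + 1) hj hjlen (by omega)
  omega

-- ---- bridge for port B ----
lemma badEq (s : List Char) (C : String) :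
    ((PySem.List.enumerate s).filter (fun p => !(String.ofList [p.2] == C))).map (fun p => p.1)
      = (pvBadIdx C s).map (fun (i : Nat) => (i : Int)) := by
  rw [PySem.List.enumerate_eq_map_pyRange s ' ']
  have hlen : PySem.List.len s = (s.length : Int) := by simp [PySem.List.len]
  rw [hlen, PySem.List.pyRange_zero_nat, List.map_map, List.filter_map, List.map_map]
  have hpred : ((fun p => !(String.ofList [p.2] == C)) ∘
        ((fun j => (j, PySem.List.pyGetD s j ' ')) ∘ fun k : Nat => (k : Int)))
      = (fun i => pvBadP C (s.getD i ' ')) := by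
    funext k
    simp [Function.comp, PySem.List.pyGetD_natCast, pvBadP]
  rw [hpred]
  rfl

lemma stepB_eq (s : List Char) (C : String) (B : Int) (hB : 0 ≤ B) (k : Nat) (best : Int) :
    pvStepB ((pvBadIdx C s).map (fun (i : Nat) => (i : Int))) s.length B best (k : Int)
      = max best (pvHi C s B.toNat k - pvLo C s k - 1) := by
  have hBt : (B.toNat : Int) = B := Int.toNat_of_nonneg hB
  simp only [pvStepB, pvLo, pvHi, List.length_map]
  by_cases h0 : 0 < k
  · rw [if_pos (show (0:Int) < (k:Int) by omega), if_pos h0,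
        show ((k:Int) - 1) = ((k - 1 : Nat) : Int) by omega,
        PySem.List.pyGetD_natCast, getD_map_int]
    by_cases h1 : k + B.toNat < (pvBadIdx C s).length
    · rw [if_pos (show (k:Int) + B < ((pvBadIdx C s).length : Int) by omega), if_pos h1,
          show ((k:Int) + B) = ((k + B.toNat : Nat) : Int) by omega,
          PySem.List.pyGetD_natCast, getD_map_int]
    · rw [if_neg (show ¬ ((k:Int) + B < ((pvBadIdx C s).length : Int)) by omega), if_neg h1]
  · rw [if_neg (show ¬ ((0:Int) < (k:Int)) by omega), if_neg h0]
    by_cases h1 : k + B.toNat < (pvBadIdx C s).length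
    · rw [if_pos (show (k:Int) + B < ((pvBadIdx C s).length : Int) by omega), if_pos h1,
          show ((k:Int) + B) = ((k + B.toNat : Nat) : Int) by omega,
          PySem.List.pyGetD_natCast, getD_map_int]
    · rw [if_neg (show ¬ ((k:Int) + B < ((pvBadIdx C s).length : Int)) by omega), if_neg h1]

-- every gap candidate is (the length of) a valid window
lemma cand_valid (C : String) (s : List Char) (B : Int) (hB : 0 ≤ B)
    (hm : B.toNat < (pvBadIdx C s).length) {j : Nat}
    (hj : j ≤ (pvBadIdx C s).length - B.toNat) :
    ∃ (k l : Nat), pvHi C s B.toNat j - pvLo C s j - 1 = (k : Int)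
      ∧ l + k ≤ s.length
      ∧ (pvCnt C s (l + k) : Int) - (pvCnt C s l : Int) ≤ B := by
  have hBt : (B.toNat : Int) = B := Int.toNat_of_nonneg hB
  have hjm : j + B.toNat ≤ (pvBadIdx C s).length := by omega
  -- the right bound of the window
  obtain ⟨H, hH1, hH2, hH3⟩ :
      ∃ H : Nat, pvHi C s B.toNat j = (H : Int)
        ∧ pvCnt C s H = j + B.toNat ∧ H ≤ s.length := by
    by_cases hc : j + B.toNat < (pvBadIdx C s).length
    · refine ⟨(pvBadIdx C s)[j + B.toNat], ?_, cnt_at_badIdx C s hc,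
        le_of_lt (badIdx_lt_length C s hc)⟩
      unfold pvHi
      rw [if_pos hc, List.getD_eq_getElem?_getD, List.getElem?_eq_getElem hc,
          Option.getD_some]
    · have hje : j + B.toNat = (pvBadIdx C s).length := by omega
      refine ⟨s.length, ?_, ?_, le_rfl⟩
      · unfold pvHi; rw [if_neg hc]
      · rw [hje, badIdx_length C s]
  -- the left bound of the window
  obtain ⟨l, hL1, hL2, hL3⟩ :
      ∃ l : Nat, pvLo C s j = (l : Int) - 1
        ∧ pvCnt C s l = j ∧ l ≤ H := by
    by_cases h0 : 0 < j
    · have hj1 : j - 1 < (pvBadIdx C s).length := by omega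
      refine ⟨(pvBadIdx C s)[j - 1] + 1, ?_, ?_, ?_⟩
      · unfold pvLo
        rw [if_pos h0, List.getD_eq_getElem?_getD, List.getElem?_eq_getElem hj1,
            Option.getD_some]
        push_cast
        ring
      · have := cnt_at_badIdx_succ C s hj1
        rw [this]; omega
      · -- (pvBadIdx C s)[j-1] < H
        by_cases hc : j + B.toNat < (pvBadIdx C s).length
        · have hlt : (pvBadIdx C s)[j - 1] < (pvBadIdx C s)[j + B.toNat] :=
            List.pairwise_iff_getElem.mp (badIdx_sorted C s) (j - 1) (j + B.toNat)
              hj1 hc (by omega)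
          have hHe : pvHi C s B.toNat j = ((pvBadIdx C s)[j + B.toNat] : Int) := by
            unfold pvHi
            rw [if_pos hc, List.getD_eq_getElem?_getD, List.getElem?_eq_getElem hc,
                Option.getD_some]
          rw [hH1] at hHe
          have : H = (pvBadIdx C s)[j + B.toNat] := by exact_mod_cast hHe
          omega
        · have hHe : pvHi C s B.toNat j = (s.length : Int) := by
            unfold pvHi; rw [if_neg hc]
          rw [hH1] at hHe
          have hHn : H = s.length := by exact_mod_cast hHe
          have := badIdx_lt_length C s hj1
          omega
    · refine ⟨0, ?_, by simp [pvCnt]; omega, by omega⟩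
      unfold pvLo
      rw [if_neg h0]
      norm_num
  refine ⟨H - l, l, ?_, by omega, ?_⟩
  · rw [hH1, hL1]
    push_cast
    omega
  · have hle : l + (H - l) = H := by omega
    rw [hle, hH2, hL2]
    omega

-- every valid window is covered by some gap candidate
lemma cand_cover (C : String) (s : List Char) (B : Int) (hB : 0 ≤ B)
    (hm : B.toNat < (pvBadIdx C s).length) (l k : Nat)
    (hlk : l + k ≤ s.length)
    (hval : (pvCnt C s (l + k) : Int) - (pvCnt C s l : Int) ≤ B) :
    ∃ j, j ≤ (pvBadIdx C s).length - B.toNat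
      ∧ (k : Int) ≤ pvHi C s B.toNat j - pvLo C s j - 1 := by
  have hBt : (B.toNat : Int) = B := Int.toNat_of_nonneg hB
  have hln : l ≤ s.length := by omega
  have hlkn : l + k ≤ s.length := hlk
  have hcl : pvCnt C s (l + k) ≤ pvCnt C s l + B.toNat := by omega
  have hcm : pvCnt C s (l + k) ≤ (pvBadIdx C s).length := by
    rw [badIdx_length C s]
    exact pvCnt_mono C s hlk
  set m := (pvBadIdx C s).length with hmm
  refine ⟨min (pvCnt C s l) (m - B.toNat), by omega, ?_⟩
  set j := min (pvCnt C s l) (m - B.toNat) with hjdef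
  have hjle : j ≤ pvCnt C s l := min_le_left _ _
  have hjor : j = pvCnt C s l ∨ j = m - B.toNat := min_choice _ _
  have hjm : j ≤ m - B.toNat := min_le_right _ _
  have hlo : pvLo C s j < (l : Int) := by
    unfold pvLo
    by_cases h0 : 0 < j
    · rw [if_pos h0]
      have hj1 : j - 1 < m := by omega
      rw [List.getD_eq_getElem?_getD, List.getElem?_eq_getElem hj1, Option.getD_some]
      have := (badIdx_lt_iff C s hj1 hln).mpr (by omega)
      exact_mod_cast this
    · rw [if_neg h0]
      omega
  have hhi : ((l + k : Nat) : Int) ≤ pvHi C s B.toNat j := by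
    unfold pvHi
    by_cases hc : j + B.toNat < m
    · rw [if_pos hc, List.getD_eq_getElem?_getD, List.getElem?_eq_getElem hc,
          Option.getD_some]
      have hge : ¬ ((pvBadIdx C s)[j + B.toNat] < l + k) := by
        rw [badIdx_lt_iff C s hc hlkn]
        omega
      have : l + k ≤ (pvBadIdx C s)[j + B.toNat] := by omega
      exact_mod_cast this
    · rw [if_neg hc]
      exact_mod_cast hlkn
  have hcast : ((l + k : Nat) : Int) = (l : Int) + (k : Int) := by push_cast; ring
  omega

-- ---- the two easy cases ----
lemma pvLf_neg (C : String) (s : List Char) (B : Int) (hB : B < 0) :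
    ∀ k, pvLf C s B k = k := by
  intro k
  induction k with
  | zero => rfl
  | succ k ih =>
    simp only [pvLf, ih]
    rw [if_pos]
    have hsucc : pvCnt C s (Nat.succ k) = pvCnt C s (k + 1) := rfl
    have := pvCnt_mono C s (Nat.le_succ k)
    omega

lemma pvLf_all (C : String) (s : List Char) (B : Int)
    (hB : (pvCnt C s s.length : Int) ≤ B) : ∀ k, k ≤ s.length → pvLf C s B k = 0 := by
  intro k hk
  induction k with
  | zero => rfl
  | succ k ih =>
    have ih' := ih (by omega)
    simp only [pvLf, ih']
    rw [if_neg]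
    have hsucc : pvCnt C s (Nat.succ k) = pvCnt C s (k + 1) := rfl
    have h1 := pvCnt_mono C s (show k + 1 ≤ s.length by omega)
    have h0 : pvCnt C s 0 = 0 := by simp [pvCnt]
    rw [h0]
    omega

-- ===== VERDICT (by name: the statement is the Claim_ definition above) =====
theorem max_contiguous_c_spec : Claim_equal_max_contiguous_c := by
  intro A B C _dom
  unfold Spec_max_contiguous_c
  rw [bridgeA A B C]
  simp only [max_contiguous_c_alt]
  rw [badEq A.toList C]
  set s := A.toList with hs
  by_cases hB : B < 0
  · rw [if_pos hB, pvLf_neg C s B hB s.length]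
    simp
  · rw [if_neg hB]
    have hB' : 0 ≤ B := by omega
    rw [List.length_map, badIdx_length C s]
    by_cases hm : ((pvCnt C s s.length : Nat) : Int) ≤ B
    · rw [if_pos hm, pvLf_all C s B hm s.length le_rfl]
      simp
    · rw [if_neg hm]
      have hmN : B.toNat < (pvBadIdx C s).length := by
        rw [badIdx_length C s]
        omega
      have hmlen := badIdx_length C s
      have ht : ((pvCnt C s s.length : Int) - B + 1)
          = (((pvBadIdx C s).length - B.toNat + 1 : Nat) : Int) := by
        push_cast
        omega
      rw [ht, PySem.List.pyRange_zero_nat]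
      simp only [List.foldl_map]
      have hfun : (fun (b : Int) (k : Nat) =>
            pvStepB ((pvBadIdx C s).map (fun (i : Nat) => (i : Int))) s.length B b (k : Int))
          = (fun (b : Int) (k : Nat) => max b (pvHi C s B.toNat k - pvLo C s k - 1)) := by
        funext b k
        exact stepB_eq s C B hB' k b
      rw [hfun]
      obtain ⟨h0, hub, hcases⟩ := foldl_max_range
        (fun k => pvHi C s B.toNat k - pvLo C s k - 1)
        ((pvBadIdx C s).length - B.toNat + 1)
      apply le_antisymm
      · obtain ⟨l, hl1, hl2⟩ := pvLf_valid C s B hB' s.length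
        obtain ⟨j, hj1, hj2⟩ :=
          cand_cover C s B hB' hmN l (s.length - pvLf C s B s.length) hl1 hl2
        exact le_trans hj2 (hub j (by omega))
      · rcases hcases with hz | ⟨j, hj, hEq⟩
        · rw [hz]
          exact Int.natCast_nonneg _
        · rw [hEq]
          obtain ⟨k, l, hk1, hk2, hk3⟩ := cand_valid C s B hB' hmN
            (show j ≤ (pvBadIdx C s).length - B.toNat by omega)
          have h4 := pvLf_ge_of_valid C s B l k hk2 hk3
          rw [hk1]
          exact_mod_cast h4
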